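-- pv_equiv track=rewrite | github.com/MrBrantCode/unitest_baseline | mut_generate/mist_train_cf/cf_59434/solution.py | find_max_indices
-- ===== SOURCE A (Python) =====
-- def find_max_indices(input_list):
--     max_values = sorted(set(input_list), reverse=True)[:3]
--     max_indices = {max_value: [] for max_value in max_values}
--
--     for index, value in enumerate(input_list):
--         if value in max_values:
--             max_indices[value].append(index)
--
--     all_indices = [index for indices in max_indices.values() for index in indices]
--
--     return sorted(all_indices)[:3]
-- ===== SOURCE B (Python) =====
-- def find_max_indices(input_list):
--     # One linear pass maintaining the three largest distinct values,
--     # then one index-order pass collecting the first three matching indices.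
--     m1 = m2 = m3 = None
--     for v in input_list:
--         if v == m1 or v == m2 or v == m3:
--             continue
--         if m1 is None or v > m1:
--             m1, m2, m3 = v, m1, m2
--         elif m2 is None or v > m2:
--             m2, m3 = v, m2
--         elif m3 is None or v > m3:
--             m3 = v
--     result = []
--     for i, v in enumerate(input_list):
--         if v == m1 or v == m2 or v == m3:
--             result.append(i)
--             if len(result) == 3:
--                 break
--     return result
-- ===== Notes on version B (the rewrite author's own statement) =====
-- stated objective: faster
-- what changed: Replaces set-building, sorting the distinct values, a dict of index lists and a final sort by a single linear scan tracking the three largest distinct values followed by an index-order scan that collects the first three matching indices and exits early.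
import Mathlib
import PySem

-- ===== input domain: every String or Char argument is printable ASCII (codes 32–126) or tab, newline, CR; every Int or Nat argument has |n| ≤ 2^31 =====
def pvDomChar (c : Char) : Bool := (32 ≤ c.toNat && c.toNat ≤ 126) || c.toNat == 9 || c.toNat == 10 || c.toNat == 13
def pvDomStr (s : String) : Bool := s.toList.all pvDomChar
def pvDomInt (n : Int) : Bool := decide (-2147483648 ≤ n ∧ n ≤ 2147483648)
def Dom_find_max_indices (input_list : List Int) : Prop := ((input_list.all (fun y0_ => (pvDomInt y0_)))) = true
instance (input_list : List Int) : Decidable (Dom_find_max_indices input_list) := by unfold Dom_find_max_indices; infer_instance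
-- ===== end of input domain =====

-- B replaces A's sort of the distinct values, dict of per-value index lists and final sort of
-- the collected indices by a linear top-3 scan plus an early-exit index-order collecting scan.

-- ===== PORT A =====
def find_max_indices (input_list : List Int) : List Int :=
  -- sorted(set(input_list), reverse=True)[:3]  (distinct values, identity key: order-independent)
  let max_values := (PySem.List.sorted (PySem.Set.ofList input_list) (fun x => x) true).take 3
  -- {max_value: [] for max_value in max_values}
  let d0 : PySem.Dict Int (List Int) :=
    max_values.foldl (fun d v => d.insert v []) PySem.Dict.empty
  -- for index, value in enumerate(input_list): if value in max_values: max_indices[value].append(index)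
  let d := (PySem.List.enumerate input_list).foldl
    (fun d p => if p.2 ∈ max_values then d.modify p.2 [] (fun l => l ++ [p.1]) else d) d0
  -- [index for indices in max_indices.values() for index in indices]
  let all_indices := d.values.flatMap (fun l => l)
  -- sorted(all_indices)[:3]
  (PySem.List.sorted all_indices (fun x => x) false).take 3

-- ===== PORT B =====
-- "v == m1 or v == m2 or v == m3"
def pvTest (s : Option Int × Option Int × Option Int) (v : Int) : Bool :=
  s.1 == some v || s.2.1 == some v || s.2.2 == some v

-- "m is None or v > m"
def pvNoneLt (o : Option Int) (v : Int) : Bool :=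
  match o with
  | none => true
  | some a => decide (a < v)

-- body of B's first loop
def pvTop3Step (s : Option Int × Option Int × Option Int) (v : Int) :
    Option Int × Option Int × Option Int :=
  if pvTest s v then s
  else if pvNoneLt s.1 v then (some v, s.1, s.2.1)
  else if pvNoneLt s.2.1 v then (s.1, some v, s.2.1)
  else if pvNoneLt s.2.2 v then (s.1, s.2.1, some v)
  else s

-- B's second loop, exiting as soon as three indices are collected
def pvCollect (s : Option Int × Option Int × Option Int) :
    List (Int × Int) → List Int → List Int
  | [], acc => acc
  | p :: rest, acc =>
    if pvTest s p.2 then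
      if (acc ++ [p.1]).length = 3 then acc ++ [p.1]
      else pvCollect s rest (acc ++ [p.1])
    else pvCollect s rest acc

def find_max_indices_alt (input_list : List Int) : List Int :=
  let s := input_list.foldl pvTop3Step (none, none, none)
  pvCollect s (PySem.List.enumerate input_list) []

-- ===== PRECONDITION & SPEC =====
def Spec_find_max_indices (input_list : List Int) (out : List Int) : Prop := out = find_max_indices_alt input_list
instance (input_list : List Int) (out : List Int) : Decidable (Spec_find_max_indices input_list out) := by unfold Spec_find_max_indices; infer_instance

-- ===== CLAIM (what is proved, stated in full; the proofs are below) =====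
def Claim_equal_find_max_indices : Prop := ∀ (input_list : List Int), Dom_find_max_indices input_list → Spec_find_max_indices input_list (find_max_indices input_list)

-- ===== LEMMAS AND PROOFS =====

-- the three tracked values as a list (largest first)
def pvTriList (s : Option Int × Option Int × Option Int) : List Int :=
  s.1.toList ++ s.2.1.toList ++ s.2.2.toList

lemma pvMem_triList (s : Option Int × Option Int × Option Int) (v : Int) :
    v ∈ pvTriList s ↔ pvTest s v = true := by
  obtain ⟨o1, o2, o3⟩ := s
  cases o1 <;> cases o2 <;> cases o3 <;>
    simp [pvTriList, pvTest, @eq_comm Int v, or_assoc]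

-- invariant tying the triple to the set of values seen so far
def pvInv (S : List Int) (s : Option Int × Option Int × Option Int) : Prop :=
  (pvTriList s).Pairwise (fun a b => b < a) ∧
  (∀ x ∈ pvTriList s, x ∈ S) ∧
  (∀ x ∈ S, x ∉ pvTriList s → (pvTriList s).length = 3 ∧ ∀ y ∈ pvTriList s, x < y) ∧
  (s.1 = none → s.2.1 = none) ∧ (s.2.1 = none → s.2.2 = none)

lemma pvInv_step (S : List Int) (s : Option Int × Option Int × Option Int) (v : Int)
    (h : pvInv S s) : pvInv (PySem.Set.add S v) (pvTop3Step s v) := by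
  obtain ⟨hpw, hsub, hmax, hsh1, hsh2⟩ := h
  by_cases ht : pvTest s v = true
  · -- value already tracked: triple and set are unchanged
    have hv : v ∈ pvTriList s := (pvMem_triList _ _).mpr ht
    rw [PySem.Set.add_of_mem (hsub _ hv)]
    simp only [pvTop3Step, ht, if_true]
    exact ⟨hpw, hsub, hmax, hsh1, hsh2⟩
  · have hvt : v ∉ pvTriList s := fun hm => ht ((pvMem_triList _ _).mp hm)
    have hmem : ∀ x, x ∈ PySem.Set.add S v ↔ x ∈ S ∨ x = v := PySem.Set.mem_add S v
    obtain ⟨m1, m2, m3⟩ := s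
    simp only [pvTop3Step, ht, if_false, Bool.false_eq_true]
    cases m1 with
    | none =>
      have h2 : m2 = none := hsh1 rfl
      have h3 : m3 = none := hsh2 (by simpa using h2)
      subst h2 h3
      have hS : ∀ x, x ∉ S := by
        intro x hx
        have := (hmax x hx (by simp [pvTriList])).1
        simp [pvTriList] at this
      simp only [pvNoneLt, if_true]
      refine ⟨by simp [pvTriList], ?_, ?_, by simp, by simp⟩
      · intro x hx
        simp [pvTriList] at hx
        exact (hmem x).mpr (Or.inr hx)
      · intro x hx hnx
        rcases (hmem x).mp hx with hx' | rfl
        · exact absurd hx' (hS x)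
        · exact absurd (by simp [pvTriList]) hnx
    | some a =>
      have hva : v ≠ a := by
        intro h; exact hvt (by simp [pvTriList, h])
      have haS : a ∈ S := hsub a (by simp [pvTriList])
      cases m2 with
      | none =>
        have h3 : m3 = none := hsh2 rfl
        subst h3
        have hS : ∀ x ∈ S, x = a := by
          intro x hx
          by_contra hne
          have := (hmax x hx (by simp [pvTriList, hne])).1
          simp [pvTriList] at this
        by_cases hav : a < v
        · simp only [pvNoneLt, hav, decide_true, if_true]
          refine ⟨by simp [pvTriList]; omega, ?_, ?_, by simp, by simp⟩
          · intro x hx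
            simp [pvTriList] at hx
            rcases hx with rfl | rfl
            · exact (hmem x).mpr (Or.inr rfl)
            · exact (hmem x).mpr (Or.inl haS)
          · intro x hx hnx
            exfalso
            rcases (hmem x).mp hx with hx' | rfl
            · exact hnx (by simp [pvTriList, hS x hx'])
            · exact hnx (by simp [pvTriList])
        · have hvla : v < a := lt_of_le_of_ne (not_lt.mp hav) hva
          simp only [pvNoneLt, hav, decide_false, if_false, if_true, Bool.false_eq_true]
          refine ⟨by simp [pvTriList]; omega, ?_, ?_, by simp, by simp⟩
          · intro x hx
            simp [pvTriList] at hx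
            rcases hx with rfl | rfl
            · exact (hmem x).mpr (Or.inl haS)
            · exact (hmem x).mpr (Or.inr rfl)
          · intro x hx hnx
            exfalso
            rcases (hmem x).mp hx with hx' | rfl
            · exact hnx (by simp [pvTriList, hS x hx'])
            · exact hnx (by simp [pvTriList])
      | some b =>
        have hvb : v ≠ b := by
          intro h; exact hvt (by simp [pvTriList, h])
        have hbS : b ∈ S := hsub b (by simp [pvTriList])
        have hba : b < a := by
          have h' := hpw
          cases m3 <;> simp [pvTriList] at h' <;> tauto
        cases m3 with
        | none =>
          have hS : ∀ x ∈ S, x = a ∨ x = b := by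
            intro x hx
            by_contra hne
            rw [not_or] at hne
            have := (hmax x hx (by simp [pvTriList, hne.1, hne.2])).1
            simp [pvTriList] at this
          have hsub2 : ∀ x, x = a ∨ x = b ∨ x = v → x ∈ PySem.Set.add S v := by
            rintro x (rfl | rfl | rfl)
            · exact (hmem x).mpr (Or.inl haS)
            · exact (hmem x).mpr (Or.inl hbS)
            · exact (hmem x).mpr (Or.inr rfl)
          have hfull : ∀ x ∈ PySem.Set.add S v, x = a ∨ x = b ∨ x = v := by
            intro x hx
            rcases (hmem x).mp hx with hx' | rfl
            · rcases hS x hx' with rfl | rfl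
              · exact Or.inl rfl
              · exact Or.inr (Or.inl rfl)
            · exact Or.inr (Or.inr rfl)
          by_cases hav : a < v
          · simp only [pvNoneLt, hav, decide_true, if_true]
            refine ⟨by simp [pvTriList]; omega, ?_, ?_, by simp, by simp⟩
            · intro x hx
              simp [pvTriList] at hx
              exact hsub2 x (by tauto)
            · intro x hx hnx
              exfalso
              rcases hfull x hx with rfl | rfl | rfl <;> exact hnx (by simp [pvTriList])
          · have hvla : v < a := lt_of_le_of_ne (not_lt.mp hav) hva
            by_cases hbv : b < v
            · simp only [pvNoneLt, hav, hbv, decide_true, decide_false, if_false, if_true,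
                Bool.false_eq_true]
              refine ⟨by simp [pvTriList]; omega, ?_, ?_, by simp, by simp⟩
              · intro x hx
                simp [pvTriList] at hx
                exact hsub2 x (by tauto)
              · intro x hx hnx
                exfalso
                rcases hfull x hx with rfl | rfl | rfl <;> exact hnx (by simp [pvTriList])
            · have hvlb : v < b := lt_of_le_of_ne (not_lt.mp hbv) hvb
              simp only [pvNoneLt, hav, hbv, decide_false, if_false, if_true,
                Bool.false_eq_true]
              refine ⟨by simp [pvTriList]; omega, ?_, ?_, by simp, by simp⟩
              · intro x hx
                simp [pvTriList] at hx
                exact hsub2 x (by tauto)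
              · intro x hx hnx
                exfalso
                rcases hfull x hx with rfl | rfl | rfl <;> exact hnx (by simp [pvTriList])
        | some c =>
          have hvc : v ≠ c := by
            intro h; exact hvt (by simp [pvTriList, h])
          have hcS : c ∈ S := hsub c (by simp [pvTriList])
          have hcb : c < b := by
            have h' := hpw
            simp [pvTriList] at h'
            tauto
          have hca : c < a := lt_trans hcb hba
          have hrest : ∀ x ∈ S, x ≠ a → x ≠ b → x ≠ c → x < a ∧ x < b ∧ x < c := by
            intro x hx hxa hxb hxc
            have h' := (hmax x hx (by simp [pvTriList, hxa, hxb, hxc])).2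
            simp [pvTriList] at h'
            exact h'
          have hsub3 : ∀ x, x = a ∨ x = b ∨ x = c ∨ x = v → x ∈ PySem.Set.add S v := by
            rintro x (rfl | rfl | rfl | rfl)
            · exact (hmem x).mpr (Or.inl haS)
            · exact (hmem x).mpr (Or.inl hbS)
            · exact (hmem x).mpr (Or.inl hcS)
            · exact (hmem x).mpr (Or.inr rfl)
          by_cases hav : a < v
          · simp only [pvNoneLt, hav, decide_true, if_true]
            refine ⟨by simp [pvTriList]; omega, ?_, ?_, by simp, by simp⟩
            · intro x hx
              simp [pvTriList] at hx
              exact hsub3 x (by tauto)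
            · intro x hx hnx
              have hnx' : x ≠ v ∧ x ≠ a ∧ x ≠ b := by
                refine ⟨?_, ?_, ?_⟩ <;> intro h' <;> exact hnx (by simp [pvTriList, h'])
              constructor
              · simp [pvTriList]
              · intro y hy
                simp [pvTriList] at hy
                rcases (hmem x).mp hx with hx' | rfl
                · by_cases hxc : x = c
                  · subst hxc
                    rcases hy with rfl | rfl | rfl
                    · omega
                    · omega
                    · omega
                  · obtain ⟨h1, h2, h3⟩ := hrest x hx' hnx'.2.1 hnx'.2.2 hxc
                    rcases hy with rfl | rfl | rfl
                    · omega
                    · omega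
                    · omega
                · exact absurd rfl hnx'.1
          · have hvla : v < a := lt_of_le_of_ne (not_lt.mp hav) hva
            by_cases hbv : b < v
            · simp only [pvNoneLt, hav, hbv, decide_true, decide_false, if_false, if_true,
                Bool.false_eq_true]
              refine ⟨by simp [pvTriList]; omega, ?_, ?_, by simp, by simp⟩
              · intro x hx
                simp [pvTriList] at hx
                exact hsub3 x (by tauto)
              · intro x hx hnx
                have hnx' : x ≠ a ∧ x ≠ v ∧ x ≠ b := by
                  refine ⟨?_, ?_, ?_⟩ <;> intro h' <;> exact hnx (by simp [pvTriList, h'])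
                constructor
                · simp [pvTriList]
                · intro y hy
                  simp [pvTriList] at hy
                  rcases (hmem x).mp hx with hx' | rfl
                  · by_cases hxc : x = c
                    · subst hxc
                      rcases hy with rfl | rfl | rfl
                      · omega
                      · omega
                      · omega
                    · obtain ⟨h1, h2, h3⟩ := hrest x hx' hnx'.1 hnx'.2.2 hxc
                      rcases hy with rfl | rfl | rfl
                      · omega
                      · omega
                      · omega
                  · exact absurd rfl hnx'.2.1
            · have hvlb : v < b := lt_of_le_of_ne (not_lt.mp hbv) hvb
              by_cases hcv : c < v
              · simp only [pvNoneLt, hav, hbv, hcv, decide_true, decide_false, if_false,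
                  if_true, Bool.false_eq_true]
                refine ⟨by simp [pvTriList]; omega, ?_, ?_, by simp, by simp⟩
                · intro x hx
                  simp [pvTriList] at hx
                  exact hsub3 x (by tauto)
                · intro x hx hnx
                  have hnx' : x ≠ a ∧ x ≠ b ∧ x ≠ v := by
                    refine ⟨?_, ?_, ?_⟩ <;> intro h' <;> exact hnx (by simp [pvTriList, h'])
                  constructor
                  · simp [pvTriList]
                  · intro y hy
                    simp [pvTriList] at hy
                    rcases (hmem x).mp hx with hx' | rfl
                    · by_cases hxc : x = c
                      · subst hxc
                        rcases hy with rfl | rfl | rfl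
                        · omega
                        · omega
                        · omega
                      · obtain ⟨h1, h2, h3⟩ := hrest x hx' hnx'.1 hnx'.2.1 hxc
                        rcases hy with rfl | rfl | rfl
                        · omega
                        · omega
                        · omega
                    · exact absurd rfl hnx'.2.2
              · have hvlc : v < c := lt_of_le_of_ne (not_lt.mp hcv) hvc
                simp only [pvNoneLt, hav, hbv, hcv, decide_false, if_false,
                  Bool.false_eq_true]
                refine ⟨hpw, ?_, ?_, hsh1, hsh2⟩
                · intro x hx
                  exact (hmem x).mpr (Or.inl (hsub x hx))
                · intro x hx hnx
                  rcases (hmem x).mp hx with hx' | rfl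
                  · exact hmax x hx' hnx
                  · constructor
                    · simp [pvTriList]
                    · intro y hy
                      simp [pvTriList] at hy
                      rcases hy with rfl | rfl | rfl
                      · omega
                      · omega
                      · omega

lemma pvInv_fold (xs : List Int) :
    pvInv (PySem.Set.ofList xs) (xs.foldl pvTop3Step (none, none, none)) := by
  rw [PySem.Set.ofList_eq_foldl]
  induction xs using List.reverseRecOn with
  | nil => simp [pvInv, pvTriList]
  | append_singleton xs x ih =>
      rw [List.foldl_append, List.foldl_append]
      exact pvInv_step _ _ _ ih

-- any strictly descending permutation IS sorted(·, reverse=True)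
lemma pvSortedDesc_unique (xs ys : List Int) (hp : ys.Perm xs)
    (hs : ys.Pairwise (fun a b => b < a)) :
    PySem.List.sorted xs (fun x => x) true = ys := by
  have hnd : ys.Nodup := hs.imp (fun h => ne_of_gt h)
  have hperm : (PySem.List.sorted xs (fun x => x) true).Perm ys :=
    (PySem.List.sorted_perm xs _ true).trans hp.symm
  have hge : (PySem.List.sorted xs (fun x => x) true).Pairwise (fun a b => b ≤ a) :=
    PySem.List.sorted_pairwise_rev xs (fun x => x)
  have hnd' : (PySem.List.sorted xs (fun x => x) true).Nodup := hperm.nodup_iff.mpr hnd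
  have hlt : (PySem.List.sorted xs (fun x => x) true).Pairwise (fun a b => b < a) :=
    (hnd'.and hge).imp (fun ⟨hne, hle⟩ => lt_of_le_of_ne hle (Ne.symm hne))
  exact List.Perm.eq_of_pairwise
    (fun a b _ _ h1 h2 => absurd (lt_trans h1 h2) (lt_irrefl _)) hlt hs hperm

lemma pvTriList_length_le (s : Option Int × Option Int × Option Int) :
    (pvTriList s).length ≤ 3 := by
  obtain ⟨o1, o2, o3⟩ := s
  cases o1 <;> cases o2 <;> cases o3 <;> simp [pvTriList]

-- the invariant characterises the top-3 of the distinct values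
lemma pvTop3_eq (S : List Int) (s : Option Int × Option Int × Option Int)
    (hnd : S.Nodup) (h : pvInv S s) :
    (PySem.List.sorted S (fun x => x) true).take 3 = pvTriList s := by
  obtain ⟨hpw, hsub, hmax, -, -⟩ := h
  have hndt : (pvTriList s).Nodup := hpw.imp (fun h => ne_of_gt h)
  have hlen3 : (pvTriList s).length ≤ 3 := pvTriList_length_le s
  set t := pvTriList s with ht
  set R := S.filter (fun x => decide (x ∉ t)) with hR
  have hndR : R.Nodup := hnd.filter _
  have hsR : (PySem.List.sorted R (fun x => x) true).Perm R := PySem.List.sorted_perm R _ true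
  have hsorted : PySem.List.sorted S (fun x => x) true = t ++ PySem.List.sorted R (fun x => x) true := by
    apply pvSortedDesc_unique
    · refine List.Perm.trans (List.Perm.append_left t hsR) ?_
      rw [List.perm_ext_iff_of_nodup (List.Nodup.append hndt hndR ?_) hnd]
      · intro a
        simp only [List.mem_append, hR, List.mem_filter, decide_eq_true_eq]
        constructor
        · rintro (hat | ⟨haS, -⟩)
          · exact hsub a hat
          · exact haS
        · intro haS
          by_cases hat : a ∈ t
          · exact Or.inl hat
          · exact Or.inr ⟨haS, hat⟩
      · intro a hat haR
        rw [hR] at haR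
        simp only [List.mem_filter, decide_eq_true_eq] at haR
        exact haR.2 hat
    · rw [List.pairwise_append]
      refine ⟨hpw, ?_, ?_⟩
      · have hge := PySem.List.sorted_pairwise_rev R (fun x => x)
        have hnds : (PySem.List.sorted R (fun x => x) true).Nodup := hsR.nodup_iff.mpr hndR
        exact (hnds.and hge).imp (fun ⟨hne, hle⟩ => lt_of_le_of_ne hle (Ne.symm hne))
      · intro a hat b hbs
        have hbR : b ∈ R := hsR.mem_iff.mp hbs
        rw [hR] at hbR
        simp only [List.mem_filter, decide_eq_true_eq] at hbR
        exact (hmax b hbR.1 hbR.2).2 a hat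
  rw [hsorted]
  by_cases h3 : t.length = 3
  · rw [List.take_append_of_le_length (le_of_eq h3.symm), List.take_of_length_le (le_of_eq h3)]
  · have hRnil : R = [] := by
      rw [List.eq_nil_iff_forall_not_mem]
      intro x hx
      rw [hR] at hx
      simp only [List.mem_filter, decide_eq_true_eq] at hx
      exact h3 (hmax x hx.1 hx.2).1
    rw [hRnil]
    rw [(PySem.List.sorted_eq_nil_iff ([] : List Int) (fun x => x) true).mpr rfl]
    rw [List.append_nil, List.take_of_length_le hlen3]

-- B's collect loop is take-3 of the filtered indices
lemma pvCollect_eq (s : Option Int × Option Int × Option Int)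
    (l : List (Int × Int)) (acc : List Int) (hacc : acc.length < 3) :
    pvCollect s l acc = (acc ++ (l.filter (fun p => pvTest s p.2)).map (·.1)).take 3 := by
  induction l generalizing acc with
  | nil =>
      simp only [pvCollect, List.filter_nil, List.map_nil, List.append_nil]
      rw [List.take_of_length_le (le_of_lt hacc)]
  | cons p rest ih =>
      simp only [pvCollect]
      by_cases htp : pvTest s p.2 = true
      · simp only [htp, if_true, List.filter_cons, List.map_cons]
        by_cases h3 : (acc ++ [p.1]).length = 3
        · simp only [h3, if_true]
          rw [show acc ++ p.1 :: (rest.filter (fun p => pvTest s p.2)).map (·.1)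
                = (acc ++ [p.1]) ++ (rest.filter (fun p => pvTest s p.2)).map (·.1) by simp]
          rw [List.take_append_of_le_length (le_of_eq h3.symm),
              List.take_of_length_le (le_of_eq h3)]
        · simp only [h3, if_false]
          have hlt : (acc ++ [p.1]).length < 3 := by
            simp only [List.length_append, List.length_cons, List.length_nil] at h3 ⊢
            omega
          rw [ih _ hlt, List.append_assoc]
          rfl
      · have hfalse : pvTest s p.2 = false := by simpa using htp
        simp only [hfalse, Bool.false_eq_true, if_false, List.filter_cons]
        exact ih _ hacc

-- folding Set.add over elements already present leaves the set unchanged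
lemma pvFoldl_add_of_subset (M ys : List Int) (h : ∀ y ∈ ys, y ∈ M) :
    List.foldl PySem.Set.add M ys = M := by
  induction ys with
  | nil => rfl
  | cons y ys ih =>
      rw [List.foldl_cons, PySem.Set.add_of_mem (h y (by simp))]
      exact ih (fun z hz => h z (by simp [hz]))

-- splitting a filter over a disjunction into two filters (up to permutation)
lemma pvFilter_or_perm {α : Type} (a b : α → Bool) (l : List α)
    (hd : ∀ x, ¬(a x = true ∧ b x = true)) :
    (l.filter (fun x => a x || b x)).Perm (l.filter a ++ l.filter b) := by
  induction l with
  | nil => simp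
  | cons x l ih =>
      simp only [List.filter_cons]
      by_cases hax : a x = true
      · have hbx : ¬ b x = true := fun hb => hd x ⟨hax, hb⟩
        simp only [hax, hbx, Bool.true_or, if_true]
        exact ih.cons x
      · by_cases hbx : b x = true
        · simp only [hax, hbx, Bool.false_or, if_true]
          exact (ih.cons x).trans List.perm_middle.symm
        · simp only [hax, hbx, Bool.false_or]
          exact ih

-- flatMap of per-value filters is a permutation of the membership filter
lemma pvFlatMap_filter_perm (M : List Int) (E : List (Int × Int)) (hnd : M.Nodup) :
    (M.flatMap (fun v => (E.filter (fun p => p.2 == v)).map (·.1))).Perm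
      ((E.filter (fun p => decide (p.2 ∈ M))).map (·.1)) := by
  induction M with
  | nil => simp
  | cons v M ih =>
      have hvM : v ∉ M := (List.nodup_cons.mp hnd).1
      have hndM : M.Nodup := (List.nodup_cons.mp hnd).2
      simp only [List.flatMap_cons]
      have hsplit := pvFilter_or_perm (fun p : Int × Int => p.2 == v)
        (fun p : Int × Int => decide (p.2 ∈ M)) E
        (by
          rintro p ⟨h1, h2⟩
          simp only [beq_iff_eq] at h1
          simp only [decide_eq_true_eq] at h2
          exact hvM (h1 ▸ h2))
      have hcongr : E.filter (fun p => decide (p.2 ∈ v :: M))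
          = E.filter (fun p => (p.2 == v) || decide (p.2 ∈ M)) := by
        apply List.filter_congr
        intro p _
        by_cases h : p.2 = v <;> simp [h]
      rw [hcongr]
      refine List.Perm.trans ?_ (hsplit.map (·.1)).symm
      rw [List.map_append]
      exact List.Perm.append_left _ (ih hndM)

-- A computes take-3 of the indices whose value is among the top-3 distinct values
lemma pvA_eq (xs : List Int) :
    find_max_indices xs =
      (((PySem.List.enumerate xs).filter
          (fun p => decide (p.2 ∈ (PySem.List.sorted (PySem.Set.ofList xs) (fun x => x) true).take 3))).map
        (·.1)).take 3 := by
  simp only [find_max_indices]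
  set M := (PySem.List.sorted (PySem.Set.ofList xs) (fun x => x) true).take 3 with hM
  have hndM : M.Nodup :=
    (List.take_sublist 3 _).nodup
      ((PySem.List.sorted_perm _ _ true).nodup_iff.mpr (PySem.Set.nodup_ofList xs))
  -- the initial dict: each value of M mapped to []
  set d0 : PySem.Dict Int (List Int) :=
    M.foldl (fun d v => d.insert v []) PySem.Dict.empty with hd0
  have hd0items : d0.items = M.map (fun v => (v, ([] : List Int))) := by
    rw [hd0]
    have := PySem.Dict.items_foldl_insert_fresh M (fun v => v) (fun _ => ([] : List Int))
      (PySem.Dict.empty : PySem.Dict Int (List Int))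
      (by intro a _; simp [PySem.Dict.contains_empty]) (by simpa using hndM)
    simpa using this
  have hd0keys : d0.keys = M := by
    simp [PySem.Dict.keys, hd0items, Function.comp_def]
  have hd0getD : ∀ c, d0.getD c [] = [] := by
    intro c
    by_cases hc : c ∈ M
    · exact PySem.Dict.getD_of_mem_items d0
        (by rw [hd0items]; exact List.mem_map_of_mem hc) (by rw [hd0keys]; exact hndM) []
    · refine PySem.Dict.getD_of_not_contains d0 [] ?_
      rw [PySem.Dict.contains_eq_decide_mem_keys, hd0keys]
      simpa using hc
  -- the filling loop
  set E' := (PySem.List.enumerate xs).filter (fun p => decide (p.2 ∈ M)) with hE'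
  have hEfold : (PySem.List.enumerate xs).foldl
      (fun d p => if p.2 ∈ M then d.modify p.2 [] (fun l => l ++ [p.1]) else d) d0
      = E'.foldl (fun d p => d.modify p.2 [] (fun l => l ++ [p.1])) d0 :=
    PySem.List.foldl_ite_eq_foldl_filter _ _ _ _
  have hswap : E'.foldl (fun d p => d.modify p.2 [] (fun l => l ++ [p.1])) d0
      = (E'.map (fun p => (p.2, p.1))).foldl
          (fun d q => d.modify q.1 [] (fun l => l ++ [q.2])) d0 := by
    rw [List.foldl_map]
  set d := (E'.map (fun p => (p.2, p.1))).foldl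
      (fun d q => d.modify q.1 [] (fun l => l ++ [q.2])) d0 with hd
  have hkeys : d.keys = M := by
    rw [hd]
    have := PySem.Dict.keys_foldl_modify_key (E'.map (fun p => (p.2, p.1)))
      (fun q => q.1) ([] : List Int) (fun _ q l => l ++ [q.2]) d0
    rw [this, hd0keys]
    have hsubM : ∀ y ∈ (E'.map (fun p => (p.2, p.1))).map (fun q => q.1), y ∈ M := by
      intro y hy
      simp only [List.map_map, List.mem_map, Function.comp] at hy
      obtain ⟨p, hp, rfl⟩ := hy
      rw [hE'] at hp
      exact (by simpa using (List.mem_filter.mp hp).2)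
    -- adding elements already present leaves the set unchanged
    rw [show PySem.Set.update M ((E'.map (fun p => (p.2, p.1))).map (fun q => q.1))
          = ((E'.map (fun p => (p.2, p.1))).map (fun q => q.1)).foldl PySem.Set.add M
        from by simp [PySem.Set.update]]
    exact pvFoldl_add_of_subset _ _ hsubM
  have hgetD : ∀ c, d.getD c [] = (E'.filter (fun p => p.2 == c)).map (·.1) := by
    intro c
    rw [hd, PySem.Dict.getD_foldl_modify_append, hd0getD, List.nil_append]
    rw [List.filter_map]
    simp only [List.map_map]
    congr 1
  have hvalues : d.values = M.map (fun v => (E'.filter (fun p => p.2 == v)).map (·.1)) := by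
    rw [PySem.Dict.values_eq_map_keys d (by rw [hkeys]; exact hndM) ([] : List Int), hkeys]
    exact List.map_congr_left (fun v _ => hgetD v)
  rw [hEfold, hswap, hvalues]
  -- the flattened index lists are a permutation of the filtered index list
  have hperm : (M.map (fun v => (E'.filter (fun p => p.2 == v)).map (·.1))).flatMap (fun l => l)
      |>.Perm (E'.map (·.1)) := by
    rw [List.flatMap_map]
    have := pvFlatMap_filter_perm M E' hndM
    have hEE : E'.filter (fun p => decide (p.2 ∈ M)) = E' := by
      rw [List.filter_eq_self]
      intro p hp
      rw [hE'] at hp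
      exact (List.mem_filter.mp hp).2
    rw [hEE] at this
    exact this
  -- the filtered index list is strictly increasing, so it IS the sorted flattening
  have hpwE : (E'.map (·.1)).Pairwise (fun a b => a < b) := by
    rw [List.pairwise_map]
    exact List.Pairwise.sublist List.filter_sublist (PySem.List.pairwise_lt_enumerate xs 0)
  rw [PySem.List.sorted_eq_of_perm_of_pairwise_lt _ _ (fun x => x) hperm.symm hpwE]

-- ===== VERDICT (by name: the statement is the Claim_ definition above) =====
theorem find_max_indices_spec : Claim_equal_find_max_indices := by
  intro xs _
  unfold Spec_find_max_indices
  have hinv := pvInv_fold xs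
  have hM := pvTop3_eq _ _ (PySem.Set.nodup_ofList xs) hinv
  rw [pvA_eq, hM]
  show _ = find_max_indices_alt xs
  unfold find_max_indices_alt
  rw [pvCollect_eq _ _ _ (by simp)]
  simp only [List.nil_append]
  congr 2
  apply List.filter_congr
  intro p _
  cases hb : pvTest (List.foldl pvTop3Step (none, none, none) xs) p.2
  · simp only [decide_eq_false_iff_not]
    intro hmem'
    rw [pvMem_triList] at hmem'
    simp [hb] at hmem'
  · simp only [decide_eq_true_eq]
    exact (pvMem_triList _ _).mpr hb
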